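-- pv_equiv track=rewrite | github.com/qzhang92/Take_Home_Qi_Zhang | read.py | custom_tokenizer
-- ===== SOURCE A (Python) =====
-- def custom_tokenizer(file_content: str) -> list:
--     tokens = []
--
--     # 1. Process line by line and remove comments (adjust comment markers as needed)
--     for line in file_content.split('\n'):
--         # Remove inline comments
--         if ';' in line:
--             line = line[:line.index(';')]
--         if '#' in line:
--             line = line[:line.index('#')]
--
--         # 2. Clean up whitespace and special characters, then split
--         # Replace commas with spaces for unified handling
--         line = line.replace(',', ' ').strip()
--
--         # 3. Split by space and normalize to uppercase
--         line_tokens = [token.upper() for token in line.split() if token]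
--         tokens.extend(line_tokens)
--
--     return tokens
-- ===== SOURCE B (Python) =====
-- def custom_tokenizer(file_content: str) -> list:
--     # One pass over the characters: a tiny state machine tracking whether we
--     # are inside a comment and the characters of the token being built.
--     tokens = []
--     cur = []
--     in_comment = False
--     for ch in file_content:
--         if ch == '\n':
--             in_comment = False
--             if cur:
--                 tokens.append(''.join(cur))
--                 cur = []
--         elif in_comment:
--             pass
--         elif ch == ';' or ch == '#':
--             in_comment = True
--             if cur:
--                 tokens.append(''.join(cur))
--                 cur = []
--         elif ch == ',' or ch.isspace():
--             if cur:
--                 tokens.append(''.join(cur))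
--                 cur = []
--         else:
--             cur.append(ch.upper())
--     if cur:
--         tokens.append(''.join(cur))
--     return tokens
-- ===== Notes on version B (the rewrite author's own statement) =====
-- stated objective: alternative
-- what changed: Replaced A's per-line pipeline (split(' '), index-based comment slicing, replace, strip, split, upper per token) by a single character-level state machine that scans the text once, tracking an in-comment flag and the current token.
import Mathlib
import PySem

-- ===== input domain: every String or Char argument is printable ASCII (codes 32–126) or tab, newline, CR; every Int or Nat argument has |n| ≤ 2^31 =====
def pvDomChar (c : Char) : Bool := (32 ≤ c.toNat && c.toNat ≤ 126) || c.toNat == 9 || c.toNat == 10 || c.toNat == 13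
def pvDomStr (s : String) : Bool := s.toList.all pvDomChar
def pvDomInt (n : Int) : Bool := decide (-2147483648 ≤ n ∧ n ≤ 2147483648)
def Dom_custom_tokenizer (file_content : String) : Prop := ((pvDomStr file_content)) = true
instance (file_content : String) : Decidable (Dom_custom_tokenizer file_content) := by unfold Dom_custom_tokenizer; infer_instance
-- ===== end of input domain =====

-- B re-implements the tokenizer as a single character-level state machine (one pass,
-- no per-line splitting, no index/slice comment stripping); equal return value proved below.

set_option maxRecDepth 4096

-- ===== PORT A =====
-- A: split into lines, cut each line at ';' then at '#', replace ',' by ' ', strip,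
-- split on whitespace, uppercase each token, extend the accumulator.
def custom_tokenizer (file_content : String) : List String :=
  ((PySem.Str.split? file_content "\n").getD []).foldl
    (fun tokens line =>
      let line1 := if PySem.Str.isIn ";" line then
          PySem.Str.slice line none (some (PySem.Str.find line ";")) else line
      let line2 := if PySem.Str.isIn "#" line1 then
          PySem.Str.slice line1 none (some (PySem.Str.find line1 "#")) else line1
      let line3 := PySem.Str.strip (PySem.Str.replace line2 "," " ")
      tokens ++ ((PySem.Str.split₀ line3).filter (fun t => t != "")).map PySem.Str.upper)
    []

-- ===== PORT B =====
-- 'if cur: tokens.append(''.join(cur)); cur = []' — flush the pending token.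
def pvFlush (toks : List String) (cur : List Char) : List String :=
  if cur.isEmpty then toks else toks ++ [String.ofList cur]

-- one step of B's state machine; state = (in_comment, cur, tokens)
def pvStep (st : Bool × List Char × List String) (ch : Char) : Bool × List Char × List String :=
  if ch = '\n' then (false, [], pvFlush st.2.2 st.2.1)
  else if st.1 then st
  else if ch = ';' ∨ ch = '#' then (true, [], pvFlush st.2.2 st.2.1)
  else if ch = ',' ∨ PySem.Chars.isspace ch then (false, [], pvFlush st.2.2 st.2.1)
  else (st.1, st.2.1 ++ [PySem.Chars.upperChar ch], st.2.2)

def custom_tokenizer_alt (file_content : String) : List String :=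
  let fin := file_content.toList.foldl pvStep (false, [], [])
  pvFlush fin.2.2 fin.2.1

-- ===== PRECONDITION & SPEC =====
def Spec_custom_tokenizer (file_content : String) (out : List String) : Prop := out = custom_tokenizer_alt file_content
instance (file_content : String) (out : List String) : Decidable (Spec_custom_tokenizer file_content out) := by unfold Spec_custom_tokenizer; infer_instance

-- ===== CLAIM (what is proved, stated in full; the proofs are below) =====
def Claim_equal_custom_tokenizer : Prop := ∀ (file_content : String), Dom_custom_tokenizer file_content → Spec_custom_tokenizer file_content (custom_tokenizer file_content)

-- ===== LEMMAS AND PROOFS =====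

-- (first line, remaining lines) of a character list, split at '\n'
def pvLines : List Char → List Char × List (List Char)
  | [] => ([], [])
  | c :: t => if c = '\n' then ([], (pvLines t).1 :: (pvLines t).2)
              else (c :: (pvLines t).1, (pvLines t).2)

def pvFlushT (cur : List Char) : List (List Char) := if cur = [] then [] else [cur]

-- token lists (as char lists) produced from one line, given the pending token chars
def pvLineTok : List Char → List Char → List (List Char)
  | cur, [] => pvFlushT cur
  | cur, c :: t =>
    if c = ';' ∨ c = '#' then pvFlushT cur
    else if c = ',' ∨ PySem.Chars.isspace c then pvFlushT cur ++ pvLineTok [] t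
    else pvLineTok (cur ++ [PySem.Chars.upperChar c]) t

-- recursive form of B's machine, at char-list level
def pvRunB : Bool → List Char → List Char → List (List Char)
  | _, cur, [] => pvFlushT cur
  | inC, cur, c :: t =>
    if c = '\n' then pvFlushT cur ++ pvRunB false [] t
    else if inC then pvRunB true cur t
    else if c = ';' ∨ c = '#' then pvFlushT cur ++ pvRunB true [] t
    else if c = ',' ∨ PySem.Chars.isspace c then pvFlushT cur ++ pvRunB false [] t
    else pvRunB inC (cur ++ [PySem.Chars.upperChar c]) t

-- what split₀.go computes: whitespace-words, pending token kept reversed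
def pvWordsRev : List Char → List Char → List (List Char)
  | cur, [] => if cur = [] then [] else [cur.reverse]
  | cur, c :: t => if PySem.Chars.isspace c then
      (if cur = [] then pvWordsRev [] t else cur.reverse :: pvWordsRev [] t)
    else pvWordsRev (c :: cur) t

def pvCommaSp (c : Char) : Char := if c = ',' then ' ' else c

def pvKeep (c : Char) : Bool := (c != ';') && (c != '#')

-- ---- B side: the fold is the recursive machine; the machine follows the line structure ----
theorem pvFlush_eq (toks : List String) (cur : List Char) :
    pvFlush toks cur = toks ++ (pvFlushT cur).map String.ofList := by
  by_cases h : cur = [] <;> simp [pvFlush, pvFlushT, h]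

theorem pvFoldB_eq_runB (cs : List Char) : ∀ (inC : Bool) (cur : List Char) (toks : List String),
    (fun fin => pvFlush fin.2.2 fin.2.1) ((cs.foldl pvStep (inC, cur, toks)))
      = toks ++ (pvRunB inC cur cs).map String.ofList := by
  induction cs with
  | nil => intro inC cur toks; simp [pvRunB, pvFlush_eq]
  | cons c t ih =>
    intro inC cur toks
    simp only [List.foldl_cons]
    by_cases h1 : c = '\n'
    · simp [pvStep, h1, pvRunB, ih, pvFlush_eq]
    · by_cases h2 : inC
      · simp [pvStep, h1, h2, pvRunB, ih]
      · by_cases h3 : c = ';' ∨ c = '#'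
        · simp [pvStep, h1, h2, h3, pvRunB, ih, pvFlush_eq]
        · by_cases h4 : c = ',' ∨ PySem.Chars.isspace c
          · simp [pvStep, h1, h2, h3, h4, pvRunB, ih, pvFlush_eq]
          · simp [pvStep, h1, h2, h3, h4, pvRunB, ih]

theorem pvRunB_lines (cs : List Char) :
    (∀ cur, pvRunB false cur cs
        = pvLineTok cur (pvLines cs).1 ++ ((pvLines cs).2).flatMap (pvLineTok []))
    ∧ pvRunB true [] cs = ((pvLines cs).2).flatMap (pvLineTok []) := by
  induction cs with
  | nil => simp [pvRunB, pvLines, pvLineTok, pvFlushT]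
  | cons c t ih =>
    obtain ⟨ih1, ih2⟩ := ih
    by_cases h1 : c = '\n'
    · constructor
      · intro cur
        simp [pvRunB, pvLines, pvLineTok, h1, ih1]
      · simp [pvRunB, pvLines, pvFlushT, h1, ih1]
    · have hsp : (c = ',' ∨ PySem.Chars.isspace c) → ¬ (c = ';' ∨ c = '#') → True := fun _ _ => trivial
      by_cases h3 : c = ';' ∨ c = '#'
      · have hnsp : ¬ (c = ',' ∨ PySem.Chars.isspace c) := by
          rcases h3 with h | h <;> simp [h] <;> decide
        constructor
        · intro cur
          simp [pvRunB, pvLines, pvLineTok, h1, h3, ih2]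
        · simp [pvRunB, pvLines, h1, ih2]
      · by_cases h4 : c = ',' ∨ PySem.Chars.isspace c
        · constructor
          · intro cur
            simp [pvRunB, pvLines, pvLineTok, h1, h3, h4, ih1]
          · simp [pvRunB, pvLines, h1, ih2]
        · constructor
          · intro cur
            simp [pvRunB, pvLines, pvLineTok, h1, h3, h4, ih1]
          · simp [pvRunB, pvLines, h1, ih2]

-- ---- A side: characterizations of the PySem primitives as used by A ----
theorem pvIsPrefixOf_single (c0 c : Char) (t : List Char) :
    List.isPrefixOf [c0] (c :: t) = (c0 == c) := by
  show (c0 == c && List.isPrefixOf [] t) = (c0 == c)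
  cases t <;> simp [List.isPrefixOf]

theorem pvSplitOnGo_nl (cs : List Char) : ∀ (fuel : Nat) (cur : List Char) (acc : List (List Char)),
    cs.length < fuel →
    PySem.Chars.splitOn.go ['\n'] fuel cs cur acc
      = acc.reverse ++ ((cur.reverse ++ (pvLines cs).1) :: (pvLines cs).2) := by
  induction cs with
  | nil =>
    intro fuel cur acc hf
    match fuel, hf with
    | fuel+1, _ => simp [PySem.Chars.splitOn.go, pvLines]
  | cons c t ih =>
    intro fuel cur acc hf
    match fuel, hf with
    | fuel+1, hf =>
      by_cases h : c = '\n'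
      · have hp : List.isPrefixOf ['\n'] (c :: t) = true := by subst h; simp [pvIsPrefixOf_single]
        simp only [PySem.Chars.splitOn.go, hp, if_pos]
        rw [show List.drop ['\n'].length (c :: t) = t by simp]
        rw [ih fuel [] (cur.reverse :: acc) (by simpa using Nat.lt_of_succ_lt_succ hf)]
        simp [pvLines, h]
      · have hp : List.isPrefixOf ['\n'] (c :: t) = false := by rw [pvIsPrefixOf_single]; exact beq_false_of_ne (fun hh => h hh.symm)
        simp only [PySem.Chars.splitOn.go, hp]
        rw [if_neg (by simp [hp])]
        rw [ih fuel (c :: cur) acc (by simpa using Nat.lt_of_succ_lt_succ hf)]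
        simp [pvLines, h]

theorem pvSplitOn_nl (cs : List Char) :
    PySem.Chars.splitOn cs ['\n'] = (pvLines cs).1 :: (pvLines cs).2 := by
  unfold PySem.Chars.splitOn
  rw [pvSplitOnGo_nl cs (cs.length + 1) [] [] (by omega)]
  simp

theorem pvReplaceGo_comma (cs : List Char) : ∀ (fuel : Nat) (acc : List Char),
    cs.length ≤ fuel →
    PySem.Chars.replace.go [','] [' '] fuel cs acc = acc.reverse ++ cs.map pvCommaSp := by
  induction cs with
  | nil =>
    intro fuel acc hf
    match fuel with
    | 0 => simp [PySem.Chars.replace.go]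
    | fuel+1 => simp [PySem.Chars.replace.go]
  | cons c t ih =>
    intro fuel acc hf
    match fuel, hf with
    | fuel+1, hf =>
      by_cases h : c = ','
      · have hp : List.isPrefixOf [','] (c :: t) = true := by subst h; simp [pvIsPrefixOf_single]
        simp only [PySem.Chars.replace.go, hp, if_pos]
        rw [show List.drop [','].length (c :: t) = t by simp]
        rw [ih fuel ([' '].reverse ++ acc) (by simpa using Nat.le_of_succ_le_succ hf)]
        simp [pvCommaSp, h]
      · have hp : List.isPrefixOf [','] (c :: t) = false := by rw [pvIsPrefixOf_single]; exact beq_false_of_ne (fun hh => h hh.symm)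
        simp only [PySem.Chars.replace.go, hp]
        rw [if_neg (by simp [hp])]
        rw [ih fuel (c :: acc) (by simpa using Nat.le_of_succ_le_succ hf)]
        simp [pvCommaSp, h]

theorem pvReplace_comma (cs : List Char) :
    PySem.Chars.replace cs [','] [' '] = cs.map pvCommaSp := by
  unfold PySem.Chars.replace
  rw [if_neg (by simp)]
  rw [pvReplaceGo_comma cs cs.length [] (by omega)]
  simp

theorem pvSplit₀Go_eq (cs : List Char) : ∀ (cur : List Char) (acc : List (List Char)),
    PySem.Chars.split₀.go cs cur acc = acc.reverse ++ pvWordsRev cur cs := by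
  induction cs with
  | nil =>
    intro cur acc
    by_cases h : cur = [] <;> simp [PySem.Chars.split₀.go, pvWordsRev, h]
  | cons c t ih =>
    intro cur acc
    by_cases h : PySem.Chars.isspace c
    · by_cases hc : cur = [] <;>
        simp [PySem.Chars.split₀.go, pvWordsRev, h, hc, ih]
    · simp [PySem.Chars.split₀.go, pvWordsRev, h, ih]

theorem pvSplit₀_eq (cs : List Char) :
    PySem.Chars.split₀ cs = pvWordsRev [] cs := by
  unfold PySem.Chars.split₀
  rw [pvSplit₀Go_eq]
  simp

theorem pvFindGo_single (c0 : Char) (l : List Char) : ∀ k : Nat,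
    PySem.Chars.find.go [c0] l k = if c0 ∈ l then ((k : Int) + l.idxOf c0) else -1 := by
  induction l with
  | nil => intro k; simp [PySem.Chars.find.go]
  | cons c t ih =>
    intro k
    by_cases h : c = c0
    · have hp : List.isPrefixOf [c0] (c :: t) = true := by subst h; simp [pvIsPrefixOf_single]
      simp [PySem.Chars.find.go, hp, h, List.idxOf_cons_self]
    · have hp : List.isPrefixOf [c0] (c :: t) = false := by rw [pvIsPrefixOf_single]; exact beq_false_of_ne (fun hh => h hh.symm)
      have hne : ¬ c0 = c := fun hh => h hh.symm
      simp only [PySem.Chars.find.go, hp, Bool.false_eq_true, if_false]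
      rw [ih (k + 1)]
      by_cases hm : c0 ∈ t
      · rw [if_pos hm, if_pos (by simp [hm]), List.idxOf_cons_ne _ (by exact h)]
        push_cast; ring
      · rw [if_neg hm, if_neg (by simp [hne, hm])]

theorem pvTakeWhile_ne (c0 : Char) (l : List Char) :
    l.takeWhile (fun c => c != c0) = l.take (l.idxOf c0) := by
  induction l with
  | nil => simp
  | cons c t ih =>
    by_cases h : c = c0
    · simp [h, List.idxOf_cons_self, List.takeWhile_cons]
    · have hne : ¬ c0 = c := fun hh => h hh.symm
      simp [List.takeWhile_cons, h, List.idxOf_cons_ne _ (h : c ≠ c0), ih]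

theorem pvCut_eq (c0 : Char) (l : List Char) :
    (if PySem.Chars.isIn [c0] l then PySem.Chars.slice l none (some (PySem.Chars.find l [c0])) else l)
      = l.takeWhile (fun c => c != c0) := by
  have hfind : PySem.Chars.find l [c0] = if c0 ∈ l then ((l.idxOf c0 : Nat) : Int) else -1 := by
    unfold PySem.Chars.find
    rw [pvFindGo_single c0 l 0]; simp
  by_cases hm : c0 ∈ l
  · have : PySem.Chars.isIn [c0] l = true := by
      simp [PySem.Chars.isIn, hfind, hm]
    rw [if_pos this, hfind, if_pos hm]
    show PySem.List.slice l none (some ((l.idxOf c0 : Nat) : Int)) = _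
    rw [PySem.List.slice_to_natCast, pvTakeWhile_ne]
  · have : PySem.Chars.isIn [c0] l = false := by
      simp [PySem.Chars.isIn, hfind, hm]
    rw [if_neg (by simp [this]), pvTakeWhile_ne, List.idxOf_of_notMem hm, List.take_length]

theorem pvWordsRev_allspace (sp : List Char) : ∀ cur, (∀ c ∈ sp, PySem.Chars.isspace c) →
    pvWordsRev cur sp = if cur = [] then [] else [cur.reverse] := by
  induction sp with
  | nil => intro cur _; simp [pvWordsRev]
  | cons c t ih =>
    intro cur hsp
    have hc := hsp c (by simp)
    by_cases hcur : cur = [] <;>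
      simp [pvWordsRev, hc, hcur, ih [] (fun d hd => hsp d (by simp [hd])),
        ih cur (fun d hd => hsp d (by simp [hd]))]

theorem pvWordsRev_append_sp (x : List Char) : ∀ (cur sp : List Char),
    (∀ c ∈ sp, PySem.Chars.isspace c) → pvWordsRev cur (x ++ sp) = pvWordsRev cur x := by
  induction x with
  | nil => intro cur sp hsp; rw [List.nil_append, pvWordsRev_allspace sp cur hsp]; rfl
  | cons c t ih =>
    intro cur sp hsp
    by_cases h : PySem.Chars.isspace c
    · by_cases hcur : cur = [] <;> simp [pvWordsRev, h, hcur, ih _ sp hsp]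
    · simp [pvWordsRev, h, ih _ sp hsp]

theorem pvWordsRev_lstrip (x : List Char) :
    pvWordsRev [] (x.dropWhile PySem.Chars.isspace) = pvWordsRev [] x := by
  induction x with
  | nil => rfl
  | cons c t ih =>
    by_cases h : PySem.Chars.isspace c
    · simp [List.dropWhile_cons, h, pvWordsRev, ih]
    · simp [List.dropWhile_cons, h]

theorem pvWordsRev_strip (x : List Char) :
    pvWordsRev [] (PySem.Chars.strip x) = pvWordsRev [] x := by
  unfold PySem.Chars.strip PySem.Chars.rstrip PySem.Chars.lstrip
  set y := x.dropWhile PySem.Chars.isspace with hy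
  have hdecomp : y = (y.reverse.dropWhile PySem.Chars.isspace).reverse
      ++ (y.reverse.takeWhile PySem.Chars.isspace).reverse := by
    have := List.takeWhile_append_dropWhile (p := PySem.Chars.isspace) (l := y.reverse)
    conv_lhs => rw [← List.reverse_reverse y, ← this, List.reverse_append]
  have hsp : ∀ c ∈ (y.reverse.takeWhile PySem.Chars.isspace).reverse, PySem.Chars.isspace c := by
    intro c hc
    exact List.mem_takeWhile_imp (by simpa using hc)
  calc pvWordsRev [] (y.reverse.dropWhile PySem.Chars.isspace).reverse
      = pvWordsRev [] ((y.reverse.dropWhile PySem.Chars.isspace).reverse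
          ++ (y.reverse.takeWhile PySem.Chars.isspace).reverse) := by
        rw [pvWordsRev_append_sp _ _ _ hsp]
    _ = pvWordsRev [] y := by rw [← hdecomp]
    _ = pvWordsRev [] x := pvWordsRev_lstrip x

theorem pvWordsRev_ne_nil (l : List Char) : ∀ cur, ∀ w ∈ pvWordsRev cur l, w ≠ [] := by
  induction l with
  | nil =>
    intro cur w hw
    by_cases h : cur = [] <;> simp [pvWordsRev, h] at hw
    simp [hw, h]
  | cons c t ih =>
    intro cur w hw
    by_cases h : PySem.Chars.isspace c
    · by_cases hcur : cur = []
      · simp only [pvWordsRev, h, if_pos, hcur, if_true] at hw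
        exact ih [] w (by simpa using hw)
      · simp only [pvWordsRev, h, if_true, hcur, if_false] at hw
        rcases (by simpa using hw : w = cur.reverse ∨ w ∈ pvWordsRev [] t) with h1 | h1
        · simp [h1, hcur]
        · exact ih [] w h1
    · simp only [pvWordsRev, h, Bool.false_eq_true, if_false] at hw
      exact ih (c :: cur) w hw

theorem pvLineTok_eq (line : List Char) : ∀ cur' : List Char,
    pvLineTok (cur'.reverse.map PySem.Chars.upperChar) line
      = (pvWordsRev cur' ((line.takeWhile pvKeep).map pvCommaSp)).map (List.map PySem.Chars.upperChar) := by
  induction line with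
  | nil =>
    intro cur'
    by_cases h : cur' = [] <;>
      simp [pvLineTok, pvWordsRev, pvFlushT, h]
  | cons c t ih =>
    intro cur'
    by_cases h3 : c = ';' ∨ c = '#'
    · have hk : pvKeep c = false := by rcases h3 with h | h <;> simp [pvKeep, h]
      by_cases h : cur' = [] <;>
        simp [pvLineTok, pvWordsRev, pvFlushT, h3, hk, List.takeWhile_cons, h]
    · have hk : pvKeep c = true := by
        simp [pvKeep]
        constructor <;> (intro hh; exact h3 (by simp [hh]))
      by_cases h4 : c = ',' ∨ PySem.Chars.isspace c
      · have hsp : PySem.Chars.isspace (pvCommaSp c) = true := by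
          rcases h4 with h | h
          · simp [pvCommaSp, h]; decide
          · by_cases hc : c = ','
            · simp [pvCommaSp, hc]; decide
            · simp [pvCommaSp, hc, h]
        by_cases h : cur' = [] <;>
          simp [pvLineTok, pvWordsRev, pvFlushT, h3, h4, hk, hsp, h] <;>
          simpa using ih []
      · have hcc : c ≠ ',' := fun hh => h4 (Or.inl hh)
        have hns : ¬ PySem.Chars.isspace c := fun hh => h4 (Or.inr hh)
        have hcs : pvCommaSp c = c := by simp [pvCommaSp, hcc]
        have : pvLineTok (cur'.reverse.map PySem.Chars.upperChar ++ [PySem.Chars.upperChar c]) t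
            = pvLineTok ((c :: cur').reverse.map PySem.Chars.upperChar) t := by simp
        simp only [pvLineTok, h3, h4, if_false, List.takeWhile_cons, hk, if_true, List.map_cons,
          hcs, pvWordsRev, hns, Bool.false_eq_true]
        rw [this, ih (c :: cur')]
        simp [hcc]

-- string-level form of the comment cut
theorem pvStrCut (c0 : Char) (sep : String) (hs : sep.toList = [c0]) (w : String) :
    (if PySem.Str.isIn sep w then PySem.Str.slice w none (some (PySem.Str.find w sep)) else w).toList
      = w.toList.takeWhile (fun c => c != c0) := by
  rw [← pvCut_eq c0 w.toList]
  by_cases hin : PySem.Chars.isIn [c0] w.toList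
  · rw [if_pos (by rw [PySem.Str.isIn_eq, hs]; exact hin), if_pos hin,
      PySem.Str.toList_slice, PySem.Str.find_eq, hs]
  · rw [if_neg (by rw [PySem.Str.isIn_eq, hs]; simpa using hin), if_neg (by simpa using hin)]

theorem pvFilter_ne_empty (ws : List (List Char)) (h : ∀ x ∈ ws, x ≠ []) :
    (ws.map String.ofList).filter (fun t => t != "") = ws.map String.ofList := by
  apply List.filter_eq_self.mpr
  intro t ht
  obtain ⟨w, hw, rfl⟩ := List.mem_map.mp ht
  simp only [bne_iff_ne, ne_eq, decide_eq_true_eq]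
  intro hEq
  exact h w hw (by simpa using congrArg String.toList hEq)

-- what A's per-line body computes, for a line given as a string
theorem pvLineA (w : String) :
    (let line1 := if PySem.Str.isIn ";" w then
        PySem.Str.slice w none (some (PySem.Str.find w ";")) else w
     let line2 := if PySem.Str.isIn "#" line1 then
        PySem.Str.slice line1 none (some (PySem.Str.find line1 "#")) else line1
     let line3 := PySem.Str.strip (PySem.Str.replace line2 "," " ")
     ((PySem.Str.split₀ line3).filter (fun t => t != "")).map PySem.Str.upper)
    = (pvLineTok [] w.toList).map String.ofList := by
  have h1 := pvStrCut ';' ";" (by decide) w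
  set line1 := if PySem.Str.isIn ";" w then
      PySem.Str.slice w none (some (PySem.Str.find w ";")) else w with hl1
  have h2' := pvStrCut '#' "#" (by decide) line1
  set line2 := if PySem.Str.isIn "#" line1 then
      PySem.Str.slice line1 none (some (PySem.Str.find line1 "#")) else line1 with hl2
  have hfun : (fun a => decide ((a != '#') = true ∧ (a != ';') = true)) = pvKeep := by
    funext a
    by_cases ha1 : a = ';' <;> by_cases ha2 : a = '#' <;> simp [pvKeep, ha1, ha2]
  have h2 : line2.toList = w.toList.takeWhile pvKeep := by
    rw [h2', h1, List.takeWhile_takeWhile, hfun]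
  have h3 : (PySem.Str.strip (PySem.Str.replace line2 "," " ")).toList
      = PySem.Chars.strip ((w.toList.takeWhile pvKeep).map pvCommaSp) := by
    rw [PySem.Str.toList_strip, PySem.Str.toList_replace, h2]
    rw [show ("," : String).toList = [','] by decide, show (" " : String).toList = [' '] by decide]
    rw [pvReplace_comma]
  have hsplit : PySem.Str.split₀ (PySem.Str.strip (PySem.Str.replace line2 "," " "))
      = (pvWordsRev [] ((w.toList.takeWhile pvKeep).map pvCommaSp)).map String.ofList := by
    rw [PySem.Str.split₀.eq_1, h3, PySem.Chars.strip.eq_1]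
    show List.map String.ofList (PySem.Chars.split₀ (PySem.Chars.strip _)) = _
    rw [pvSplit₀_eq, pvWordsRev_strip]
  show ((PySem.Str.split₀ (PySem.Str.strip (PySem.Str.replace line2 "," " "))).filter
      (fun t => t != "")).map PySem.Str.upper = _
  rw [hsplit, pvFilter_ne_empty _ (pvWordsRev_ne_nil _ [])]
  have hrhs : pvLineTok [] w.toList
      = (pvWordsRev [] ((w.toList.takeWhile pvKeep).map pvCommaSp)).map (List.map PySem.Chars.upperChar) := by
    simpa using pvLineTok_eq w.toList []
  rw [hrhs]
  simp only [List.map_map]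
  apply List.map_congr_left
  intro u _
  simp [PySem.Str.upper, PySem.Chars.upper]

-- A's extend-loop over the line list, as a flatMap
theorem pvFoldA (ls : List (List Char)) : ∀ acc : List String,
    (ls.map String.ofList).foldl
      (fun tokens line =>
        let line1 := if PySem.Str.isIn ";" line then
            PySem.Str.slice line none (some (PySem.Str.find line ";")) else line
        let line2 := if PySem.Str.isIn "#" line1 then
            PySem.Str.slice line1 none (some (PySem.Str.find line1 "#")) else line1
        let line3 := PySem.Str.strip (PySem.Str.replace line2 "," " ")
        tokens ++ ((PySem.Str.split₀ line3).filter (fun t => t != "")).map PySem.Str.upper) acc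
    = acc ++ ls.flatMap (fun lc => (pvLineTok [] lc).map String.ofList) := by
  induction ls with
  | nil => intro acc; simp
  | cons lc t ih =>
    intro acc
    simp only [List.map_cons, List.foldl_cons, List.flatMap_cons]
    rw [ih]
    have hline := pvLineA (String.ofList lc)
    simp only at hline
    rw [hline]
    simp [List.append_assoc]

-- ===== VERDICT (by name: the statement is the Claim_ definition above) =====
theorem custom_tokenizer_spec : Claim_equal_custom_tokenizer := by
  intro s _
  unfold Spec_custom_tokenizer
  have hB : custom_tokenizer_alt s = (pvRunB false [] s.toList).map String.ofList := by
    unfold custom_tokenizer_alt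
    show pvFlush (s.toList.foldl pvStep (false, [], [])).2.2
        (s.toList.foldl pvStep (false, [], [])).2.1 = _
    simpa using pvFoldB_eq_runB s.toList false [] []
  rw [hB, (pvRunB_lines s.toList).1 []]
  unfold custom_tokenizer
  have hsplit : (PySem.Str.split? s "\n").getD []
      = ((pvLines s.toList).1 :: (pvLines s.toList).2).map String.ofList := by
    rw [PySem.Str.split?.eq_1, show ("\n" : String).toList = ['\n'] by decide,
      PySem.Chars.split?.eq_1, if_neg (by simp), pvSplitOn_nl]
    simp
  rw [hsplit, pvFoldA]
  simp [List.map_append, List.map_flatMap]
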